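-- pv_equiv track=rewrite | github.com/Gynden/sniper-cloud | ias/ia_estatistica.py | _bt_repeat
-- ===== SOURCE A (Python) =====
-- def color_of(spin): return "white" if spin.get("white") else spin.get("color")
--
-- def _bt_repeat(data, n, window):
--     wins=loss=0
--     for i in range(n, len(data)):
--         seq = [color_of(x) for x in data[i-n:i]]
--         if len(set(seq))==1:
--             pred = seq[-1]
--             actual = color_of(data[i])
--             wins += (pred==actual)
--             loss += (pred!=actual)
--     return wins, loss
-- ===== SOURCE B (Python) =====
-- def color_of(spin): return "white" if spin.get("white") else spin.get("color")
--
-- def _bt_repeat(data, n, window):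
--     # One pass: keep the length of the run of equal colors ending at the previous spin.
--     if n <= 0:
--         return 0, 0
--     wins = loss = 0
--     run = 0          # length of the equal-color run ending at the previous spin
--     prev = None
--     for spin in data:
--         c = color_of(spin)
--         if run >= n:
--             if c == prev:
--                 wins += 1
--             else:
--                 loss += 1
--         run = run + 1 if (run > 0 and c == prev) else 1
--         prev = c
--     return wins, loss
-- ===== Notes on version B (the rewrite author's own statement) =====
-- stated objective: alternative
-- what changed: B replaces the per-index rebuild of data[i-n:i], its color list and set by a single pass that precomputes each spin's color once and maintains the length of the current run of equal colors as the window-uniformity test. Pre_ excludes only negative n (a negative window length, outside the function's natural domain) on lists long enough (len > -n) that Python's negative-index slicing produces windows, where A's results are an accident of that slicing; shorter lists stay inside Pre_.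
-- outside the precondition, e.g. on _bt_repeat([{'color': 'a'}, {'color': 'a'}], -1, 0): A returns (1, 0), B returns (0, 0)
import Mathlib
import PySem

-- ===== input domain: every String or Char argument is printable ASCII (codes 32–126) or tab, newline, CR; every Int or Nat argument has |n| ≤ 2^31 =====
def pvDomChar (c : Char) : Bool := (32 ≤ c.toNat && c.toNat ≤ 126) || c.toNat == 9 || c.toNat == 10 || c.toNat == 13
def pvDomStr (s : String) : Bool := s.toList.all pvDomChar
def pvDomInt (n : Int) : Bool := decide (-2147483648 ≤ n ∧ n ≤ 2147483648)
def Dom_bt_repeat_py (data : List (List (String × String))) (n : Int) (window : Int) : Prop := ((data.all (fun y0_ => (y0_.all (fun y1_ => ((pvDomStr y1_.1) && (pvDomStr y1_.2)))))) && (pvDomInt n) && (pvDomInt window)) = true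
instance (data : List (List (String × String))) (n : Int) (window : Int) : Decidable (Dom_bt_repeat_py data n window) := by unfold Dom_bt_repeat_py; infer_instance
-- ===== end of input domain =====

-- B replaces A's per-index window rebuild (slice + color list + set) by a single pass that
-- computes each color once and keeps the length of the current equal-color run (objective: alternative).

-- ===== PORT A =====
-- color_of(spin): "white" if spin.get("white") else spin.get("color")
def colorOf (spin : List (String × String)) : Option String :=
  match PySem.Dict.get? (PySem.Dict.mk spin) "white" with
  | some s => if s = "" then PySem.Dict.get? (PySem.Dict.mk spin) "color" else some "white"
  | none => PySem.Dict.get? (PySem.Dict.mk spin) "color"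

-- one iteration of A's `for i in range(n, len(data))` loop body; seq is A's
-- `[color_of(x) for x in data[i-n:i]]`, written out at each use
def aBody (data : List (List (String × String))) (n : Int) (acc : Int × Int) (i : Int) : Int × Int :=
  if PySem.Set.len (PySem.Set.ofList ((PySem.List.slice data (some (i - n)) (some i)).map colorOf)) = 1 then
    match PySem.List.pyGet? ((PySem.List.slice data (some (i - n)) (some i)).map colorOf) (-1),
          PySem.List.pyGet? data i with
    | some pred, some spin =>
      (acc.1 + (if pred = colorOf spin then 1 else 0),
       acc.2 + (if pred = colorOf spin then 0 else 1))
    | _, _ => acc   -- unreachable under Pre_: the uniform window is nonempty and i is in range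
  else acc

def bt_repeat_py (data : List (List (String × String))) (n : Int) (window : Int) : Int × Int :=
  (PySem.List.pyRange n (data.length : Int) 1).foldl (aBody data n) (0, 0)

-- ===== PORT B =====
-- state (wins, loss, run, prev); run = length of the equal-color run ending at the previous spin
def bStep (n : Int) (st : Int × Int × Int × Option String) (spin : List (String × String)) :
    Int × Int × Int × Option String :=
  let c := colorOf spin
  let wl : Int × Int :=
    if n ≤ st.2.2.1 then
      (if c = st.2.2.2 then (st.1 + 1, st.2.1) else (st.1, st.2.1 + 1))
    else (st.1, st.2.1)
  (wl.1, wl.2, (if 0 < st.2.2.1 ∧ c = st.2.2.2 then st.2.2.1 + 1 else 1), c)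

def bt_repeat_py_alt (data : List (List (String × String))) (n : Int) (window : Int) : Int × Int :=
  if n ≤ 0 then (0, 0)
  else
    let st := data.foldl (bStep n) (0, 0, 0, none)
    (st.1, st.2.1)

-- ===== PRECONDITION & SPEC =====
-- Pre_ excludes only negative n (a negative window length, outside the natural domain) on lists
-- long enough (len > -n) that Python's negative-index slicing actually produces windows there --
-- A's results on those inputs are an accident of that slicing; on shorter lists A returns (0, 0)
-- like B and they stay inside Pre_.
def Pre_bt_repeat_py (data : List (List (String × String))) (n : Int) (window : Int) : Prop :=
  0 ≤ n ∨ (data.length : Int) ≤ -n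
instance (data : List (List (String × String))) (n : Int) (window : Int) : Decidable (Pre_bt_repeat_py data n window) := by unfold Pre_bt_repeat_py; infer_instance

def pvWitness_bt_repeat_py : (List (List (String × String))) × Int × Int :=
  ([[("color", "red")], [("color", "red")], [("color", "black")]], 1, 0)

def Spec_bt_repeat_py (data : List (List (String × String))) (n : Int) (window : Int) (out : Int × Int) : Prop := out = bt_repeat_py_alt data n window
instance (data : List (List (String × String))) (n : Int) (window : Int) (out : Int × Int) : Decidable (Spec_bt_repeat_py data n window out) := by unfold Spec_bt_repeat_py; infer_instance

-- ===== CLAIM (what is proved, stated in full; the proofs are below) =====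
def Claim_equal_bt_repeat_py : Prop := ∀ (data : List (List (String × String))) (n : Int) (window : Int), Dom_bt_repeat_py data n window → Pre_bt_repeat_py data n window → Spec_bt_repeat_py data n window (bt_repeat_py data n window)

-- ===== LEMMAS AND PROOFS =====

-- all elements of a list are equal
def uniform (xs : List (Option String)) : Prop := ∀ x ∈ xs, ∀ y ∈ xs, x = y

-- length of the constant prefix of a list
def headRun : List (Option String) → Nat
  | [] => 0
  | [_] => 1
  | a :: b :: t => if a = b then headRun (b :: t) + 1 else 1

-- A's fold, with the unused `window` argument dropped (definitionally equal to bt_repeat_py)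
def Afold (data : List (List (String × String))) (n : Int) : Int × Int := bt_repeat_py data n 0

lemma afold_eq (data : List (List (String × String))) (n window : Int) :
    bt_repeat_py data n window = Afold data n := rfl

lemma headRun_pos (l : List (Option String)) (h : l ≠ []) : 1 ≤ headRun l := by
  match l with
  | [_] => simp [headRun]
  | a :: b :: t => simp only [headRun]; split_ifs <;> omega

lemma headRun_le_length : ∀ l : List (Option String), headRun l ≤ l.length
  | [] => by simp [headRun]
  | [_] => by simp [headRun]
  | a :: b :: t => by
    have ih := headRun_le_length (b :: t)
    simp only [headRun]
    split_ifs <;> simp_all [List.length_cons]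

lemma uniform_cons_cons (a x : Option String) (xs : List (Option String)) :
    uniform (a :: x :: xs) ↔ a = x ∧ uniform (x :: xs) := by
  constructor
  · intro h
    refine ⟨h a (by simp) x (by simp), fun p hp q hq => h p ?_ q ?_⟩
    · exact List.mem_cons_of_mem a hp
    · exact List.mem_cons_of_mem a hq
  · rintro ⟨rfl, h⟩ p hp q hq
    have hp2 : p ∈ a :: xs := by
      rcases List.mem_cons.mp hp with rfl | h'
      · simp
      · exact h'
    have hq2 : q ∈ a :: xs := by
      rcases List.mem_cons.mp hq with rfl | h'
      · simp
      · exact h'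
    exact h p hp2 q hq2

lemma uniform_reverse (xs : List (Option String)) : uniform xs.reverse ↔ uniform xs := by
  simp [uniform]

lemma uniform_take_iff : ∀ (l : List (Option String)) (m : Nat), 1 ≤ m → m ≤ l.length →
    (uniform (l.take m) ↔ m ≤ headRun l)
  | [], m, h1, h2 => by simp at h2; omega
  | [a], m, h1, h2 => by
    simp at h2
    have hm : m = 1 := by omega
    subst hm
    simp [headRun, uniform]
  | a :: b :: t, m, h1, h2 => by
    match m, h1 with
    | 1, _ =>
      constructor
      · intro _
        exact headRun_pos _ (by simp)
      · intro _
        simp [uniform]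
    | (m' + 2), _ =>
      have ih := uniform_take_iff (b :: t) (m' + 1) (by omega) (by simp at h2 ⊢; omega)
      rw [List.take_succ_cons, List.take_succ_cons, uniform_cons_cons,
        ← List.take_succ_cons, ih]
      simp only [headRun]
      split_ifs with hab
      · constructor
        · rintro ⟨-, h⟩; omega
        · intro h; exact ⟨hab, by omega⟩
      · constructor
        · rintro ⟨h, -⟩; exact absurd h hab
        · intro h
          have := headRun_le_length (b :: t)
          omega

lemma foldl_add_const (a : Option String) : ∀ t : List (Option String),
    (∀ x ∈ t, x = a) → t.foldl PySem.Set.add [a] = [a]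
  | [], _ => rfl
  | x :: t, h => by
    have hx : x = a := h x (by simp)
    subst hx
    have hadd : PySem.Set.add [x] x = [x] := by
      simp [PySem.Set.add, PySem.Set.contains]
    rw [List.foldl_cons, hadd]
    exact foldl_add_const x t (fun y hy => h y (by simp [hy]))

lemma setlen_one_iff (xs : List (Option String)) :
    PySem.Set.len (PySem.Set.ofList xs) = 1 ↔ xs ≠ [] ∧ uniform xs := by
  constructor
  · intro h
    have hlen : (PySem.Set.ofList xs).length = 1 := by
      have h' : ((PySem.Set.ofList xs).length : Int) = 1 := h
      exact_mod_cast h'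
    obtain ⟨a, ha⟩ := List.length_eq_one_iff.mp hlen
    have hmem : ∀ x ∈ xs, x = a := fun x hx => by
      have hx' : x ∈ PySem.Set.ofList xs := (PySem.Set.mem_ofList xs x).mpr hx
      rw [ha] at hx'
      simpa using hx'
    refine ⟨?_, fun p hp q hq => by rw [hmem p hp, hmem q hq]⟩
    rintro rfl
    rw [show PySem.Set.ofList ([] : List (Option String)) = [] from rfl] at ha
    exact absurd ha (by simp)
  · rintro ⟨hne, hu⟩
    obtain ⟨a, t, rfl⟩ := List.exists_cons_of_ne_nil hne
    have hof : PySem.Set.ofList (a :: t) = [a] := by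
      rw [PySem.Set.ofList_eq_foldl, List.foldl_cons]
      have hadd : PySem.Set.add ([] : PySem.Set (Option String)) a = [a] := by
        simp [PySem.Set.add, PySem.Set.contains]
      rw [hadd]
      exact foldl_add_const a t (fun y hy => hu y (by simp [hy]) a (by simp))
    rw [hof]
    rfl

lemma aBody_stable (ds : List (List (String × String))) (d : List (String × String))
    (n : Int) (hn : 0 ≤ n) (acc : Int × Int) (i : Int) (h1 : n ≤ i) (h2 : i < (ds.length : Int)) :
    aBody (ds ++ [d]) n acc i = aBody ds n acc i := by
  unfold aBody
  have hs : PySem.List.slice (ds ++ [d]) (some (i - n)) (some i)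
      = PySem.List.slice ds (some (i - n)) (some i) := by
    rw [PySem.List.slice_toNat _ (by omega) (by omega),
        PySem.List.slice_toNat _ (by omega) (by omega),
        List.drop_append_of_le_length (by omega),
        List.take_append_of_le_length (by rw [List.length_drop]; omega)]
  have hg : PySem.List.pyGet? (ds ++ [d]) i = PySem.List.pyGet? ds i := by
    rw [PySem.List.pyGet?_of_nonneg _ (by omega), PySem.List.pyGet?_of_nonneg _ (by omega)]
    exact List.getElem?_append_left (by omega)
  rw [hs, hg]

lemma foldl_old (ds : List (List (String × String))) (d : List (String × String))
    (n : Int) (hn : 0 ≤ n) :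
    (PySem.List.pyRange n (ds.length : Int) 1).foldl (aBody (ds ++ [d]) n) (0, 0) = Afold ds n := by
  unfold Afold bt_repeat_py
  apply PySem.List.foldl_congr_mem
  intro acc i hi
  rw [PySem.List.mem_pyRange_one] at hi
  exact aBody_stable ds d n hn acc i hi.1 hi.2

lemma Afold_snoc (n : Int) (hn : 0 ≤ n) (ds : List (List (String × String)))
    (d : List (String × String)) :
    Afold (ds ++ [d]) n =
      if n ≤ (ds.length : Int) then
        (if PySem.Set.len (PySem.Set.ofList ((ds.map colorOf).drop (ds.length - n.toNat))) = 1 then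
           ((Afold ds n).1 +
              (if (((ds.map colorOf).drop (ds.length - n.toNat)).getLast?).getD none = colorOf d then 1 else 0),
            (Afold ds n).2 +
              (if (((ds.map colorOf).drop (ds.length - n.toNat)).getLast?).getD none = colorOf d then 0 else 1))
         else Afold ds n)
      else Afold ds n := by
  have hlen : (((ds ++ [d]).length : Nat) : Int) = (ds.length : Int) + 1 := by
    simp
  by_cases hc : n ≤ (ds.length : Int)
  · rw [if_pos hc]
    show (PySem.List.pyRange n ((ds ++ [d]).length : Int) 1).foldl (aBody (ds ++ [d]) n) (0, 0) = _
    rw [hlen, PySem.List.pyRange_one_succ_right hc, List.foldl_append, foldl_old ds d n hn,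
        List.foldl_cons, List.foldl_nil]
    have hseq : (PySem.List.slice (ds ++ [d]) (some ((ds.length : Int) - n)) (some (ds.length : Int))).map colorOf
        = (ds.map colorOf).drop (ds.length - n.toNat) := by
      rw [PySem.List.slice_toNat _ (by omega) (by omega)]
      have h1 : ((ds.length : Int) - n).toNat = ds.length - n.toNat := by omega
      have h2 : ((ds.length : Int)).toNat = ds.length := by omega
      rw [h1, h2, List.drop_append_of_le_length (by omega),
          List.take_left' (by rw [List.length_drop]), ← List.map_drop]
    have hget : PySem.List.pyGet? (ds ++ [d]) ((ds.length : Int)) = some d :=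
      PySem.List.pyGet?_append_length ds [] d
    unfold aBody
    rw [hseq, hget, PySem.List.pyGet?_neg_one]
    rcases hlast : ((ds.map colorOf).drop (ds.length - n.toNat)).getLast? with _ | pred
    · have hWnil : (ds.map colorOf).drop (ds.length - n.toNat) = [] :=
        List.getLast?_eq_none_iff.mp hlast
      rw [hWnil]
      norm_num [show PySem.Set.len (PySem.Set.ofList ([] : List (Option String))) = 0 from rfl]
    · simp only [Option.getD_some]
      rfl
  · rw [if_neg hc]
    show (PySem.List.pyRange n ((ds ++ [d]).length : Int) 1).foldl (aBody (ds ++ [d]) n) (0, 0) = _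
    rw [hlen, PySem.List.pyRange_one_eq_nil (by omega), List.foldl_nil]
    unfold Afold bt_repeat_py
    rw [PySem.List.pyRange_one_eq_nil (by omega), List.foldl_nil]

lemma head?_take (l : List (Option String)) (m : Nat) (h : 1 ≤ m) :
    (l.take m).head? = l.head? := by
  cases l with
  | nil => simp
  | cons a t =>
    match m, h with
    | (k + 1), _ => simp [List.take_succ_cons]

lemma inv_main (n : Int) (hn : 1 ≤ n) (data : List (List (String × String))) :
    data.foldl (bStep n) (0, 0, 0, (none : Option String)) =
      ((Afold data n).1, (Afold data n).2,
       ((headRun (data.map colorOf).reverse : Nat) : Int),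
       (data.map colorOf).reverse.headD none) := by
  induction data using List.reverseRecOn with
  | nil =>
    have hA : Afold [] n = (0, 0) := by
      unfold Afold bt_repeat_py
      rw [show ((([] : List (List (String × String))).length : Nat) : Int) = 0 by simp,
          PySem.List.pyRange_one_eq_nil (by omega), List.foldl_nil]
    simp [hA, headRun]
  | append_singleton ds d ih =>
    rw [List.foldl_append, List.foldl_cons, List.foldl_nil, ih, Afold_snoc n (by omega) ds d]
    have hcs : (ds ++ [d]).map colorOf = ds.map colorOf ++ [colorOf d] := by simp
    rw [hcs, List.reverse_append, List.reverse_singleton, List.singleton_append]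
    have hlcs : (ds.map colorOf).length = ds.length := by simp
    have hrun_le : headRun (ds.map colorOf).reverse ≤ ds.length := by
      have := headRun_le_length (ds.map colorOf).reverse
      simpa [hlcs] using this
    -- key 1: B's run-length test  ↔  A's window-uniformity set test
    have key1 : (n ≤ ((headRun (ds.map colorOf).reverse : Nat) : Int)) ↔
        (n ≤ (ds.length : Int) ∧
         PySem.Set.len (PySem.Set.ofList ((ds.map colorOf).drop (ds.length - n.toNat))) = 1) := by
      by_cases hnL : n ≤ (ds.length : Int)
      · have hm1 : 1 ≤ n.toNat := by omega
        have hmL : n.toNat ≤ ds.length := by omega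
        have hWrev : ((ds.map colorOf).drop (ds.length - n.toNat)).reverse
            = (ds.map colorOf).reverse.take n.toNat := by
          rw [List.reverse_drop]
          congr 1
          omega
        have hWlen : ((ds.map colorOf).drop (ds.length - n.toNat)).length = n.toNat := by
          rw [List.length_drop]
          omega
        have hWne : (ds.map colorOf).drop (ds.length - n.toNat) ≠ [] := by
          intro h0
          rw [h0] at hWlen
          simp only [List.length_nil] at hWlen
          omega
        rw [setlen_one_iff]
        have huniW : uniform ((ds.map colorOf).drop (ds.length - n.toNat)) ↔
            n.toNat ≤ headRun (ds.map colorOf).reverse := by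
          rw [← uniform_reverse, hWrev]
          exact uniform_take_iff (ds.map colorOf).reverse n.toNat hm1 (by simp [hlcs]; omega)
        constructor
        · intro h
          exact ⟨hnL, hWne, huniW.mpr (by omega)⟩
        · rintro ⟨-, -, hu⟩
          have := huniW.mp hu
          omega
      · constructor
        · intro h
          omega
        · rintro ⟨h, -⟩
          exact absurd h hnL
    -- key 2: in the uniform case the window's last element is B's prev
    have key2 : n ≤ ((headRun (ds.map colorOf).reverse : Nat) : Int) →
        ((ds.map colorOf).drop (ds.length - n.toNat)).getLast?
          = some ((ds.map colorOf).reverse.headD none) := by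
      intro h
      have hm1 : 1 ≤ n.toNat := by omega
      have hne : (ds.map colorOf).reverse ≠ [] := by
        intro h0
        rw [h0] at h
        simp [headRun] at h
        omega
      have hWrev : ((ds.map colorOf).drop (ds.length - n.toNat)).reverse
          = (ds.map colorOf).reverse.take n.toNat := by
        rw [List.reverse_drop]
        congr 1
        have := hrun_le
        omega
      rw [List.getLast?_eq_head?_reverse, hWrev, head?_take _ _ hm1]
      obtain ⟨p, rest, hpr⟩ := List.exists_cons_of_ne_nil hne
      rw [hpr]
      simp
    -- key 3: the run update
    have key3 : ((headRun (colorOf d :: (ds.map colorOf).reverse) : Nat) : Int) =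
        if 0 < ((headRun (ds.map colorOf).reverse : Nat) : Int) ∧
             colorOf d = (ds.map colorOf).reverse.headD none
        then ((headRun (ds.map colorOf).reverse : Nat) : Int) + 1 else 1 := by
      cases hcr : (ds.map colorOf).reverse with
      | nil => simp [headRun]
      | cons p rest =>
        have hpos := headRun_pos (p :: rest) (by simp)
        simp only [headRun, List.headD_cons]
        by_cases hcp : colorOf d = p
        · rw [if_pos hcp, if_pos ⟨by omega, hcp⟩]
          push_cast
          ring_nf
        · rw [if_neg hcp, if_neg (fun h => hcp h.2)]
          simp
    -- assemble
    simp only [bStep, List.headD_cons]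
    by_cases hR : n ≤ ((headRun (ds.map colorOf).reverse : Nat) : Int)
    · obtain ⟨hnL, htest⟩ := key1.mp hR
      rw [if_pos hR, if_pos hnL, if_pos htest, key2 hR, key3, Option.getD_some]
      by_cases hec : colorOf d = (ds.map colorOf).reverse.headD none
      · have hrpos : (0 : Int) < ((headRun (ds.map colorOf).reverse : Nat) : Int) := by omega
        rw [if_pos hec, if_pos ⟨hrpos, hec⟩, if_pos hec.symm, if_pos hec.symm]
        simp
      · rw [if_neg hec, if_neg (fun h => hec h.2), if_neg (fun h => hec h.symm),
            if_neg (fun h => hec h.symm)]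
        simp
    · rw [if_neg hR, key3]
      have hAe : (if n ≤ (ds.length : Int) then
          (if PySem.Set.len (PySem.Set.ofList ((ds.map colorOf).drop (ds.length - n.toNat))) = 1 then
             ((Afold ds n).1 +
                (if (((ds.map colorOf).drop (ds.length - n.toNat)).getLast?).getD none = colorOf d then 1 else 0),
              (Afold ds n).2 +
                (if (((ds.map colorOf).drop (ds.length - n.toNat)).getLast?).getD none = colorOf d then 0 else 1))
           else Afold ds n)
          else Afold ds n) = Afold ds n := by
        by_cases h1 : n ≤ (ds.length : Int)
        · rw [if_pos h1, if_neg (fun h2 => hR (key1.mpr ⟨h1, h2⟩))]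
        · rw [if_neg h1]
      rw [hAe]

lemma n_zero (data : List (List (String × String))) (window : Int) :
    bt_repeat_py data 0 window = (0, 0) := by
  unfold bt_repeat_py
  have hstep : ∀ (acc : Int × Int), ∀ i ∈ PySem.List.pyRange 0 (data.length : Int) 1,
      aBody data 0 acc i = (fun (acc : Int × Int) (_ : Int) => acc) acc i := by
    intro acc i hi
    rw [PySem.List.mem_pyRange_one] at hi
    unfold aBody
    have hs : PySem.List.slice data (some (i - 0)) (some i) = [] := by
      rw [show i - 0 = i by omega, PySem.List.slice_toNat _ (by omega) (by omega)]
      simp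
    rw [hs]
    simp [show PySem.Set.ofList ([] : List (Option String)) = [] from rfl, PySem.Set.len]
  rw [PySem.List.foldl_congr_mem _ _ _ _ hstep]
  exact List.foldl_fixed' (fun _ => rfl) _

lemma n_neg (data : List (List (String × String))) (n window : Int) (hneg : n < 0)
    (hlen : (data.length : Int) ≤ -n) : bt_repeat_py data n window = (0, 0) := by
  unfold bt_repeat_py
  have hstep : ∀ (acc : Int × Int), ∀ i ∈ PySem.List.pyRange n (data.length : Int) 1,
      aBody data n acc i = (fun (acc : Int × Int) (_ : Int) => acc) acc i := by
    intro acc i hi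
    rw [PySem.List.mem_pyRange_one] at hi
    unfold aBody
    have hs : PySem.List.slice data (some (i - n)) (some i) = [] := by
      apply List.eq_nil_of_length_eq_zero
      rw [PySem.List.length_slice]
      simp only [PySem.List.clampIdx]
      split_ifs <;> omega
    rw [hs]
    simp [show PySem.Set.ofList ([] : List (Option String)) = [] from rfl, PySem.Set.len]
  rw [PySem.List.foldl_congr_mem _ _ _ _ hstep]
  exact List.foldl_fixed' (fun _ => rfl) _

-- ===== VERDICT (by name: the statement is the Claim_ definition above) =====
theorem bt_repeat_py_spec : Claim_equal_bt_repeat_py := by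
  intro data n window _hdom hpre
  unfold Spec_bt_repeat_py
  by_cases hn0 : 0 ≤ n
  · rcases eq_or_lt_of_le hn0 with h0 | h1
    · rw [← h0, n_zero]
      simp [bt_repeat_py_alt]
    · have hn : 1 ≤ n := h1
      rw [afold_eq, bt_repeat_py_alt]
      rw [if_neg (by omega)]
      rw [inv_main n hn data]
  · have hneg : n < 0 := by omega
    have hlen : (data.length : Int) ≤ -n := by
      rcases hpre with h | h
      · exact absurd h hn0
      · exact h
    rw [n_neg data n window hneg hlen, bt_repeat_py_alt, if_pos (by omega)]
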